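-- pv_equiv track=rewrite | github.com/qn06142/coding-python | 527641H.py | max_elements_with_avg_less_than_k
-- ===== SOURCE A (Python) =====
-- def max_elements_with_avg_less_than_k(N, A, Q, queries):
--
--     A.sort()
--
--     prefix_sum = [0] * (N + 1)
--     for i in range(1, N + 1):
--         prefix_sum[i] = prefix_sum[i - 1] + A[i - 1]
--
--     results = []
--     for K in queries:
--
--         left, right = 0, N
--         while left < right:
--             mid = (left + right + 1) // 2
--             if prefix_sum[mid] < K * mid:
--                 left = mid
--             else:
--                 right = mid - 1
--         results.append(left)
--
--     return results
-- ===== SOURCE B (Python) =====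
-- def max_elements_with_avg_less_than_k(N, A, Q, queries):
--     A.sort()
--     results = []
--     for K in queries:
--         running = 0
--         count = 0
--         for i in range(1, N + 1):
--             running += A[i - 1]
--             if running < K * i:
--                 count = i
--             else:
--                 break
--         results.append(count)
--     return results
-- ===== Notes on version B (the rewrite author's own statement) =====
-- stated objective: simpler
-- what changed: Replaced the prefix-sum table plus per-query binary search with a direct per-query forward scan that keeps a running sum over the sorted list and stops at the first prefix whose average reaches K (valid because prefix averages of a sorted list are monotone).
import Mathlib
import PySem

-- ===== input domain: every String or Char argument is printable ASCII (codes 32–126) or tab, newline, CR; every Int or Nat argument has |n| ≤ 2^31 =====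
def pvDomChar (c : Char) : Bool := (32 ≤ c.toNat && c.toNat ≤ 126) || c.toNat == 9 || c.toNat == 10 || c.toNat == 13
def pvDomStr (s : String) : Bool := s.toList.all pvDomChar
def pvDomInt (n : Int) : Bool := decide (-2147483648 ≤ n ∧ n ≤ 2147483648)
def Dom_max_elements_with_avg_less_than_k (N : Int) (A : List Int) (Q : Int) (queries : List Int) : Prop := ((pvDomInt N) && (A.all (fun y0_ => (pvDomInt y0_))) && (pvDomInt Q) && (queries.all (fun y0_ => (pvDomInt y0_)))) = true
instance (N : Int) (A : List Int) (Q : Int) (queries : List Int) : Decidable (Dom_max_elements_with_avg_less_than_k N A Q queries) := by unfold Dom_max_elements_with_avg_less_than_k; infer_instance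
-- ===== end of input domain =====

-- B replaces A's prefix-sum table + per-query binary search by a direct per-query running-sum
-- scan over the sorted list (simpler); A sorts its argument in place — the equivalence proved
-- here is about the RETURN value only (B performs the same sort-in-place mutation).

-- ===== PORT A =====
-- A's 'while left < right' binary-search loop (prefix_sum list ps and query K are fixed).
def pvBsearch (ps : List Int) (K : Int) (left right : Int) : Int :=
  if h : left < right then
    if PySem.List.pyGetD ps (PySem.Int.floordiv (left + right + 1) 2) 0
        < K * PySem.Int.floordiv (left + right + 1) 2 then
      pvBsearch ps K (PySem.Int.floordiv (left + right + 1) 2) right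
    else
      pvBsearch ps K left (PySem.Int.floordiv (left + right + 1) 2 - 1)
  else left
termination_by (right - left).toNat
decreasing_by
  all_goals
    have hb := PySem.Int.floordiv_two_mid_bounds (show left + 1 ≤ right by omega)
    have he : left + 1 + right = left + right + 1 := by ring
    rw [he] at hb
    omega

def max_elements_with_avg_less_than_k (N : Int) (A : List Int) (Q : Int) (queries : List Int) : List Int :=
  -- A.sort()
  let As := PySem.List.sorted A (fun x => x) false
  -- prefix_sum = [0] * (N + 1); for i in range(1, N + 1): prefix_sum[i] = prefix_sum[i-1] + A[i-1]
  -- (reads/writes are in range on Pre_; pyGetD/pySetD defaults are never used there)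
  let ps := (PySem.List.pyRange 1 (N + 1) 1).foldl
      (fun p i => PySem.List.pySetD p i
        (PySem.List.pyGetD p (i - 1) 0 + PySem.List.pyGetD As (i - 1) 0))
      (List.replicate (N + 1).toNat 0)
  -- results loop with the binary search per query
  queries.foldl (fun res K => res ++ [pvBsearch ps K 0 N]) []

-- ===== PORT B =====
-- B's inner 'for i in range(1, N+1): … else: break' loop: running sum and last good count.
def pvScan (As : List Int) (K : Int) (is_ : List Int) (running count : Int) : Int :=
  match is_ with
  | [] => count
  | i :: rest =>
    if running + PySem.List.pyGetD As (i - 1) 0 < K * i then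
      pvScan As K rest (running + PySem.List.pyGetD As (i - 1) 0) i
    else count

def max_elements_with_avg_less_than_k_alt (N : Int) (A : List Int) (Q : Int) (queries : List Int) : List Int :=
  let As := PySem.List.sorted A (fun x => x) false
  queries.foldl (fun res K => res ++ [pvScan As K (PySem.List.pyRange 1 (N + 1) 1) 0 0]) []

-- ===== PRECONDITION & SPEC =====
-- Pre_ is exactly the inputs where A returns: for N > len(A) both programs raise IndexError
-- (A at prefix_sum build, B at A[i-1]).
def Pre_max_elements_with_avg_less_than_k (N : Int) (A : List Int) (Q : Int) (queries : List Int) : Prop :=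
  N ≤ (A.length : Int)
instance (N : Int) (A : List Int) (Q : Int) (queries : List Int) : Decidable (Pre_max_elements_with_avg_less_than_k N A Q queries) := by unfold Pre_max_elements_with_avg_less_than_k; infer_instance

def pvWitness_max_elements_with_avg_less_than_k : Int × List Int × Int × List Int :=
  (3, [5, 1, 4], 2, [3, 10])

def Spec_max_elements_with_avg_less_than_k (N : Int) (A : List Int) (Q : Int) (queries : List Int) (out : List Int) : Prop := out = max_elements_with_avg_less_than_k_alt N A Q queries
instance (N : Int) (A : List Int) (Q : Int) (queries : List Int) (out : List Int) : Decidable (Spec_max_elements_with_avg_less_than_k N A Q queries out) := by unfold Spec_max_elements_with_avg_less_than_k; infer_instance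

-- ===== CLAIM (what is proved, stated in full; the proofs are below) =====
def Claim_equal_max_elements_with_avg_less_than_k : Prop := ∀ (N : Int) (A : List Int) (Q : Int) (queries : List Int), Dom_max_elements_with_avg_less_than_k N A Q queries → Pre_max_elements_with_avg_less_than_k N A Q queries → Spec_max_elements_with_avg_less_than_k N A Q queries (max_elements_with_avg_less_than_k N A Q queries)

-- ===== LEMMAS AND PROOFS =====

-- sum of the first m elements of the sorted list
def pvPref (As : List Int) (m : Nat) : Int := (As.take m).sum

theorem pvPref_succ (As : List Int) (m : Nat) (h : m < As.length) :
    pvPref As (m + 1) = pvPref As m + As[m] := by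
  simpa [pvPref] using List.sum_take_succ As m h

-- one monotonicity step: if the average of the first m+1 is < K, so is that of the first m
theorem pvMono_step (As : List Int) (K : Int) (hs : As.Pairwise (· ≤ ·))
    (m : Nat) (h1 : 1 ≤ m) (hm : m < As.length)
    (hP : pvPref As (m + 1) < K * ((m : Int) + 1)) : pvPref As m < K * m := by
  by_contra hc
  rw [not_lt] at hc
  have hub : pvPref As m ≤ (m : Int) * As[m] := by
    have hall : ∀ x ∈ As.take m, x ≤ As[m] := by
      intro x hx
      rw [List.mem_take_iff_getElem] at hx
      obtain ⟨i, hi, hxi⟩ := hx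
      have hi' : i < m := lt_of_lt_of_le hi (le_of_eq (by omega))
      have := (List.pairwise_iff_getElem.mp hs) i m (by omega) hm (by omega)
      omega
    have := List.sum_le_card_nsmul (As.take m) As[m] hall
    have hlen : (As.take m).length = m := by simp [List.length_take]; omega
    simpa [pvPref, hlen, nsmul_eq_mul] using this
  have hK : K ≤ As[m] := by
    have h0 : (0 : Int) < (m : Int) := by exact_mod_cast h1
    nlinarith
  have := pvPref_succ As m hm
  nlinarith

-- downward closure of 'prefix average < K' on a sorted list
theorem pvMono (As : List Int) (K : Int) (hs : As.Pairwise (· ≤ ·)) :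
    ∀ (d m : Nat), 1 ≤ m → m + d ≤ As.length →
      pvPref As (m + d) < K * ((m : Int) + d) → pvPref As m < K * m := by
  intro d
  induction d with
  | zero => intro m _ _ h; simpa using h
  | succ n ih =>
    intro m h1 hlen hP
    apply ih m h1 (by omega)
    have := pvMono_step As K hs (m + n) (by omega) (by omega)
      (by push_cast; push_cast at hP; convert hP using 2)
    simpa using this

-- the prefix_sum build loop fills index m with pvPref m, for all 0 <= m <= N
theorem pvPsFold (As : List Int) (N : Int) (hlen : N ≤ (As.length : Int)) :
    ∀ (k : Nat) (j : Int) (p : List Int), (N + 1 - j).toNat = k → 1 ≤ j → j ≤ N + 1 →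
      p.length = (N + 1).toNat →
      (∀ m : Int, 0 ≤ m → m < j → PySem.List.pyGetD p m 0 = pvPref As m.toNat) →
      ∀ m : Int, 0 ≤ m → m ≤ N →
        PySem.List.pyGetD ((PySem.List.pyRange j (N + 1) 1).foldl
          (fun p i => PySem.List.pySetD p i
            (PySem.List.pyGetD p (i - 1) 0 + PySem.List.pyGetD As (i - 1) 0)) p) m 0
        = pvPref As m.toNat := by
  intro k
  induction k using Nat.strong_induction_on with
  | _ k ih =>
    intro j p hk hj1 hj2 hplen hpinv m hm0 hmN
    by_cases hjr : j ≤ N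
    · rw [PySem.List.pyRange_one_cons (by omega)]
      simp only [List.foldl_cons]
      have hv1 : PySem.List.pyGetD p (j - 1) 0 = pvPref As (j - 1).toNat :=
        hpinv (j - 1) (by omega) (by omega)
      have hv2 : PySem.List.pyGetD As (j - 1) 0 = As[(j - 1).toNat]'(by omega) :=
        PySem.List.pyGetD_eq_getElem _ _ (by omega) (by omega)
      have hvp : pvPref As (j - 1).toNat + As[(j - 1).toNat]'(by omega) = pvPref As j.toNat := by
        have := pvPref_succ As (j - 1).toNat (by omega)
        have hjn : (j - 1).toNat + 1 = j.toNat := by omega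
        rw [hjn] at this
        omega
      have hset : PySem.List.pySetD p j
            (PySem.List.pyGetD p (j - 1) 0 + PySem.List.pyGetD As (j - 1) 0)
          = p.set j.toNat (pvPref As j.toNat) := by
        rw [hv1, hv2, hvp]
        obtain ⟨n, hn⟩ : ∃ n : ℕ, j = (n : Int) := ⟨j.toNat, by omega⟩
        rw [hn, PySem.List.pySetD_natCast]
        simp
      rw [hset]
      apply ih (N + 1 - (j + 1)).toNat (by omega) (j + 1) _ rfl (by omega) (by omega)
      · simpa using hplen
      · intro m' hm0' hm1'
        rw [PySem.List.pyGetD_eq_getElem _ _ hm0' (by simp; omega)]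
        rw [List.getElem_set]
        by_cases hmj : m' = j
        · simp [hmj]
        · have : ¬ (j.toNat = m'.toNat) := by omega
          rw [if_neg this]
          have := hpinv m' hm0' (by omega)
          rw [PySem.List.pyGetD_eq_getElem _ _ (by omega) (by omega)] at this
          exact this
      · exact hm0
      · exact hmN
    · rw [PySem.List.pyRange_one_eq_nil (by omega)]
      simp only [List.foldl_nil]
      exact hpinv m hm0 (by omega)

-- B's scanning loop computes the greatest prefix length whose sum is < K times it
theorem pvScanSpec (As : List Int) (K : Int) (N : Int) (hs : As.Pairwise (· ≤ ·))
    (hN : 0 ≤ N) (hlen : N ≤ (As.length : Int)) :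
    ∀ (k : Nat) (j : Int), (N + 1 - j).toNat = k → 1 ≤ j → j ≤ N + 1 →
      (∀ m : Int, 1 ≤ m → m < j → pvPref As m.toNat < K * m) →
      j - 1 ≤ pvScan As K (PySem.List.pyRange j (N + 1) 1) (pvPref As (j - 1).toNat) (j - 1) ∧
      pvScan As K (PySem.List.pyRange j (N + 1) 1) (pvPref As (j - 1).toNat) (j - 1) ≤ N ∧
      (∀ m : Int, 1 ≤ m → m ≤ N →
        (pvPref As m.toNat < K * m ↔
          m ≤ pvScan As K (PySem.List.pyRange j (N + 1) 1) (pvPref As (j - 1).toNat) (j - 1))) := by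
  intro k
  induction k using Nat.strong_induction_on with
  | _ k ih =>
    intro j hk hj1 hj2 hprev
    by_cases hjr : j ≤ N
    case neg =>
      rw [PySem.List.pyRange_one_eq_nil (by omega)]
      simp only [pvScan]
      refine ⟨le_refl _, by omega, fun m hm1 hmN => ?_⟩
      constructor
      · intro _; omega
      · intro _; exact hprev m hm1 (by omega)
    case pos =>
      rw [PySem.List.pyRange_one_cons (by omega)]
      simp only [pvScan]
      have hv2 : PySem.List.pyGetD As (j - 1) 0 = As[(j - 1).toNat]'(by omega) :=
        PySem.List.pyGetD_eq_getElem _ _ (by omega) (by omega)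
      have hvp : pvPref As (j - 1).toNat + PySem.List.pyGetD As (j - 1) 0 = pvPref As j.toNat := by
        rw [hv2]
        have := pvPref_succ As (j - 1).toNat (by omega)
        have hjn : (j - 1).toNat + 1 = j.toNat := by omega
        rw [hjn] at this
        omega
      by_cases hPj : pvPref As j.toNat < K * j
      case pos =>
        rw [if_pos (by rw [hvp]; exact hPj), hvp]
        have hres := ih (N + 1 - (j + 1)).toNat (by omega) (j + 1) rfl (by omega) (by omega)
          (by intro m hm1 hmj
              by_cases hmj' : m = j
              · rw [hmj']; exact hPj
              · exact hprev m hm1 (by omega))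
        have hsimp : (j + 1 : Int) - 1 = j := by ring
        rw [hsimp] at hres
        exact ⟨by have := hres.1; omega, hres.2.1, hres.2.2⟩
      case neg =>
        rw [if_neg (by rw [hvp]; exact hPj)]
        refine ⟨le_refl _, by omega, fun m hm1 hmN => ?_⟩
        constructor
        · intro hPm
          by_contra hgt
          have hmj : j ≤ m := by omega
          have hPj' : pvPref As j.toNat < K * j := by
            have := pvMono As K hs (m.toNat - j.toNat) j.toNat (by omega) (by omega)
              (by rw [show j.toNat + (m.toNat - j.toNat) = m.toNat by omega]
                  have hcast : ((j.toNat : Int)) + ((m.toNat - j.toNat : Nat) : Int) = m := by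
                    push_cast; omega
                  rw [hcast]
                  exact hPm)
            have hcast2 : ((j.toNat : Int)) = j := by omega
            rw [hcast2] at this
            exact this
          exact hPj hPj'
        · intro hle; exact hprev m hm1 (by omega)

-- A's binary search returns the boundary c characterised by the prefix predicate
theorem pvBsearchSpec (ps : List Int) (K : Int) (N c : Int) (h0c : 0 ≤ c) (hcN : c ≤ N)
    (hchar : ∀ m : Int, 1 ≤ m → m ≤ N → (PySem.List.pyGetD ps m 0 < K * m ↔ m ≤ c)) :
    ∀ (k : Nat) (l r : Int), (r - l).toNat = k → 0 ≤ l → l ≤ c → c ≤ r → r ≤ N →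
      pvBsearch ps K l r = c := by
  intro k
  induction k using Nat.strong_induction_on with
  | _ k ih =>
    intro l r hk hl0 hlc hcr hrN
    rw [pvBsearch]
    by_cases hlr : l < r
    case neg =>
      rw [dif_neg hlr]
      omega
    case pos =>
      rw [dif_pos hlr]
      have hb := PySem.Int.floordiv_two_mid_bounds (show l + 1 ≤ r by omega)
      have he : l + 1 + r = l + r + 1 := by ring
      rw [he] at hb
      by_cases hmc : PySem.Int.floordiv (l + r + 1) 2 ≤ c
      case pos =>
        rw [if_pos ((hchar _ (by omega) (by omega)).mpr hmc)]
        exact ih (r - PySem.Int.floordiv (l + r + 1) 2).toNat (by omega) _ _ rfl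
          (by omega) hmc hcr hrN
      case neg =>
        rw [if_neg (by
          intro hcond
          exact hmc ((hchar _ (by omega) (by omega)).mp hcond))]
        exact ih (PySem.Int.floordiv (l + r + 1) 2 - 1 - l).toNat (by omega) _ _ rfl
          hl0 hlc (by omega) (by omega)

-- per query: A's binary search over the prefix-sum table equals B's scan
theorem pvPerQuery (N : Int) (A : List Int) (hpre : N ≤ (A.length : Int)) (K : Int) :
    pvBsearch ((PySem.List.pyRange 1 (N + 1) 1).foldl
      (fun p i => PySem.List.pySetD p i
        (PySem.List.pyGetD p (i - 1) 0 +
          PySem.List.pyGetD (PySem.List.sorted A (fun x => x) false) (i - 1) 0))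
      (List.replicate (N + 1).toNat 0)) K 0 N
    = pvScan (PySem.List.sorted A (fun x => x) false) K (PySem.List.pyRange 1 (N + 1) 1) 0 0 := by
  by_cases hN : 0 ≤ N
  case neg =>
    rw [pvBsearch, dif_neg (by omega), PySem.List.pyRange_one_eq_nil (by omega)]
    simp [pvScan]
  case pos =>
    have hAs : ((PySem.List.sorted A (fun x => x) false).length : Int) = (A.length : Int) := by
      rw [PySem.List.length_sorted]
    have hlen : N ≤ ((PySem.List.sorted A (fun x => x) false).length : Int) := by omega
    have hs : (PySem.List.sorted A (fun x => x) false).Pairwise (· ≤ ·) :=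
      PySem.List.sorted_pairwise A (fun x => x)
    have hpref0 : pvPref (PySem.List.sorted A (fun x => x) false) ((1 : Int) - 1).toNat = 0 := by
      simp [pvPref]
    have hscan := pvScanSpec (PySem.List.sorted A (fun x => x) false) K N hs hN hlen
      (N + 1 - 1).toNat 1 rfl (by omega) (by omega) (by intro m hm1 hmj; omega)
    rw [hpref0] at hscan
    norm_num at hscan
    have hps := pvPsFold (PySem.List.sorted A (fun x => x) false) N hlen
      (N + 1 - 1).toNat 1 (List.replicate (N + 1).toNat 0) rfl (by omega) (by omega)
      (by simp)
      (by intro m hm0 hm1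
          have hm : m = 0 := by omega
          subst hm
          rw [PySem.List.pyGetD_eq_getElem _ _ (by omega) (by simp; omega)]
          simp [pvPref])
    exact pvBsearchSpec _ K N _ hscan.1 hscan.2.1
      (by intro m hm1 hmN
          rw [hps m (by omega) hmN]
          exact hscan.2.2 m hm1 hmN)
      (N - 0).toNat 0 N rfl (le_refl 0) hscan.1 hscan.2.1 (le_refl N)

-- ===== VERDICT (by name: the statement is the Claim_ definition above) =====
theorem max_elements_with_avg_less_than_k_spec : Claim_equal_max_elements_with_avg_less_than_k := by
  intro N A Q queries _ hpre
  unfold Spec_max_elements_with_avg_less_than_k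
  unfold max_elements_with_avg_less_than_k max_elements_with_avg_less_than_k_alt
  rw [PySem.List.foldl_append_singleton_eq_map, PySem.List.foldl_append_singleton_eq_map]
  exact List.map_congr_left (fun K _ => pvPerQuery N A hpre K)
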